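-- pv_equiv track=rewrite | github.com/jtfidje/advent_of_code | 2023/python/day-13/solver/part_1.py | check_mirror
-- ===== SOURCE A (Python) =====
-- def check_mirror(pattern):
--     results = 0
--     for i in range(len(pattern) - 1):
--         j = i + 1
--
--         horizontal_start = i
--         is_mirror = False
--         while True:
--             if pattern[i] != pattern[j]:
--                 break
--
--             i -= 1
--             j += 1
--
--
--             if i < 0 or j >= len(pattern):
--                 is_mirror = True
--                 break
--
--         if is_mirror:
--             results += horizontal_start + 1
--
--     return results
-- ===== SOURCE B (Python) =====
-- def check_mirror(pattern):
--     total = 0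
--     for i in range(1, len(pattern)):
--         top = pattern[:i][::-1]
--         bottom = pattern[i:]
--         m = min(len(top), len(bottom))
--         if top[:m] == bottom[:m]:
--             total += i
--     return total
-- ===== Notes on version B (the rewrite author's own statement) =====
-- stated objective: simpler
-- what changed: B replaces A's per-axis two-pointer while-loop expansion (comparing rows one by one with manual index bookkeeping) by a single slice comparison per axis: the reversed prefix above the axis truncated to the overlap must equal the suffix below it.
import Mathlib
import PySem

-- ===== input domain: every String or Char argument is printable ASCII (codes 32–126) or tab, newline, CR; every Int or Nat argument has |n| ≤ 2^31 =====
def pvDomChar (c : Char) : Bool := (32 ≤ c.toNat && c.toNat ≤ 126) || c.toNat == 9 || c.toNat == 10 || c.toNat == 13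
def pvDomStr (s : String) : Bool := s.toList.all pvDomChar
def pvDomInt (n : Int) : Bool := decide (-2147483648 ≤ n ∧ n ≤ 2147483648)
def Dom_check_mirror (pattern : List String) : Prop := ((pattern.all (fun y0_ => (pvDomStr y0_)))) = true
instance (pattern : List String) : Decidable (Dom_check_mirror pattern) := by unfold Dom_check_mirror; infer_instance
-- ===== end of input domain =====

-- B replaces A's per-axis two-pointer expansion loop by a reversed-prefix/suffix slice comparison (objective: simpler).

-- ===== PORT A =====
-- the `while True` expansion loop of A: compares pattern[i] and pattern[j], walks outward, stops at a boundary
def check_mirror_inner (pattern : List String) (i j : Int) : Bool :=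
  if PySem.List.pyGet? pattern i ≠ PySem.List.pyGet? pattern j then false
  else if i - 1 < 0 ∨ (pattern.length : Int) ≤ j + 1 then true
  else check_mirror_inner pattern (i - 1) (j + 1)
termination_by i.toNat
decreasing_by omega

def check_mirror (pattern : List String) : Int :=
  (PySem.List.pyRange 0 ((pattern.length : Int) - 1) 1).foldl
    (fun results i => if check_mirror_inner pattern i (i + 1) then results + (i + 1) else results) 0

-- ===== PORT B =====
def check_mirror_alt (pattern : List String) : Int :=
  (PySem.List.pyRange 1 (pattern.length : Int) 1).foldl
    (fun total i =>
      let top := (PySem.List.slice pattern none (some i)).reverse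
      let bottom := PySem.List.slice pattern (some i) none
      let m : Int := ((min top.length bottom.length : Nat) : Int)
      if PySem.List.slice top none (some m) = PySem.List.slice bottom none (some m)
      then total + i else total) 0

-- ===== PRECONDITION & SPEC =====
def Spec_check_mirror (pattern : List String) (out : Int) : Prop := out = check_mirror_alt pattern
instance (pattern : List String) (out : Int) : Decidable (Spec_check_mirror pattern out) := by unfold Spec_check_mirror; infer_instance

-- ===== CLAIM (what is proved, stated in full; the proofs are below) =====
def Claim_equal_check_mirror : Prop := ∀ (pattern : List String), Dom_check_mirror pattern → Spec_check_mirror pattern (check_mirror pattern)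

-- ===== LEMMAS AND PROOFS =====

-- canonical per-axis condition: all opposite pairs around the gap between rows a and b agree
def pvMirror (p : List String) (a b : Nat) : Prop :=
  ∀ t : Nat, t ≤ min a (p.length - 1 - b) → p[a - t]? = p[b + t]?


-- A's expansion loop computes pvMirror
theorem inner_eq_pvMirror (p : List String) : ∀ (a b : Nat), a < b → b < p.length →
    (check_mirror_inner p (a : Int) (b : Int) = true ↔ pvMirror p a b) := by
  intro a
  induction a using Nat.strong_induction_on with
  | _ a IH =>
    intro b hab hb
    rw [check_mirror_inner]
    simp only [PySem.List.pyGet?_natCast]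
    by_cases heq : p[a]? = p[b]?
    · rw [if_neg (by simp [heq])]
      by_cases hstop : ((a : Int)) - 1 < 0 ∨ ((p.length : Int)) ≤ ((b : Int)) + 1
      · rw [if_pos hstop]
        constructor
        · intro _ t ht
          have ht0 : t = 0 := by omega
          subst ht0
          simpa using heq
        · intro _; rfl
      · rw [if_neg hstop]
        push Not at hstop
        have ha1 : 1 ≤ a := by omega
        have hb1 : b + 1 < p.length := by omega
        rw [show ((a : Int)) - 1 = (((a - 1 : Nat)) : Int) by omega,
            show ((b : Int)) + 1 = (((b + 1 : Nat)) : Int) by push_cast; ring]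
        rw [IH (a - 1) (by omega) (b + 1) (by omega) hb1]
        unfold pvMirror
        constructor
        · intro h t ht
          rcases Nat.eq_zero_or_pos t with rfl | htpos
          · simpa using heq
          · have h' := h (t - 1) (by omega)
            rwa [show a - 1 - (t - 1) = a - t by omega,
                 show b + 1 + (t - 1) = b + t by omega] at h'
        · intro h t ht
          have h' := h (t + 1) (by omega)
          rwa [show a - (t + 1) = a - 1 - t by omega,
               show b + (t + 1) = b + 1 + t by omega] at h'
    · rw [if_pos (by simp [heq])]
      constructor
      · intro hfalse; exact absurd hfalse (by simp)
      · intro hM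
        exact absurd (by simpa using hM 0 (by omega)) heq

-- B's slice comparison computes pvMirror (axis s, 1 ≤ s < n; a = s-1, b = s)
theorem slice_eq_pvMirror (p : List String) (s : Nat) (h1 : 1 ≤ s) (h2 : s < p.length) :
    (PySem.List.slice ((PySem.List.slice p none (some (s : Int))).reverse) none
        (some ((min ((PySem.List.slice p none (some (s : Int))).reverse.length)
                    ((PySem.List.slice p (some (s : Int)) none).length) : Nat) : Int))
      = PySem.List.slice (PySem.List.slice p (some (s : Int)) none) none
        (some ((min ((PySem.List.slice p none (some (s : Int))).reverse.length)
                    ((PySem.List.slice p (some (s : Int)) none).length) : Nat) : Int)))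
      ↔ pvMirror p (s - 1) s := by
  rw [PySem.List.slice_to_natCast, PySem.List.slice_from_natCast]
  rw [PySem.List.slice_to_natCast, PySem.List.slice_to_natCast]
  set n := p.length with hn
  have hts : (p.take s).length = s := by simp; omega
  have hlt : (p.take s).reverse.length = s := by simp; omega
  have hlb : (p.drop s).length = n - s := by rw [hn]; simp
  set m : Nat := min ((p.take s).reverse.length) ((p.drop s).length) with hm
  have hms : m = min s (n - s) := by rw [hm, hlt, hlb]
  have hm1 : 1 ≤ m := by omega
  constructor
  · intro h t ht
    have hip : t < m := by omega
    have h' := congrArg (fun l => l[t]?) h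
    simp only at h'
    rw [List.getElem?_take_of_lt hip, List.getElem?_take_of_lt hip,
        List.getElem?_reverse (by rw [hts]; omega), List.getElem?_drop, hts,
        List.getElem?_take_of_lt (by omega)] at h'
    exact h'
  · intro h
    apply List.ext_getElem?
    intro i
    by_cases hi : i < m
    · rw [List.getElem?_take_of_lt hi, List.getElem?_take_of_lt hi,
          List.getElem?_reverse (by rw [hts]; omega), List.getElem?_drop, hts,
          List.getElem?_take_of_lt (by omega)]
      exact h i (by omega)
    · rw [List.getElem?_eq_none (by simp; omega), List.getElem?_eq_none (by simp; omega)]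

-- ===== VERDICT (by name: the statement is the Claim_ definition above) =====
theorem check_mirror_spec : Claim_equal_check_mirror := by
  intro p _
  unfold Spec_check_mirror check_mirror check_mirror_alt
  set n := p.length with hn
  have hmap : PySem.List.pyRange 1 (n : Int) 1
      = (PySem.List.pyRange 0 ((n : Int) - 1) 1).map (fun i => i + 1) := by
    rw [PySem.List.pyRange_one, PySem.List.pyRange_one, List.map_map]
    rw [show ((n : Int) - 1 - 0) = (n : Int) - 1 by ring]
    apply List.map_congr_left
    intro k _
    simp; ring
  rw [hmap, List.foldl_map]
  apply PySem.List.foldl_congr_mem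
  intro acc i hi
  rw [PySem.List.mem_pyRange_one] at hi
  obtain ⟨hi0, hi1⟩ := hi
  have hia : i = ((i.toNat : Nat) : Int) := by omega
  set a := i.toNat with hadef
  have han : a + 1 < n := by omega
  rw [hia, show ((a : Int)) + 1 = (((a + 1 : Nat)) : Int) by push_cast; ring]
  have hA := inner_eq_pvMirror p a (a + 1) (by omega) (by omega)
  have hB := slice_eq_pvMirror p (a + 1) (by omega) (by omega)
  simp only [Nat.add_sub_cancel] at hB
  by_cases hmir : pvMirror p a (a + 1)
  · rw [if_pos (hA.mpr hmir), if_pos (hB.mpr hmir)]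
  · rw [if_neg (fun hc => hmir (hA.mp hc)), if_neg (fun hc => hmir (hB.mp hc))]
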